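-- pv_equiv track=rewrite | github.com/djchill1/adventOfCode15 | 5.py | repeats_with_between
-- ===== SOURCE A (Python) =====
-- def repeats_with_between(string):
--     twices = 0
--     for index in range(2, len(string)):
--         if string[index - 2] == string[index]:
--             twices += 1
--     if twices > 0:
--         return True
--     else:
--         return False
-- ===== SOURCE B (Python) =====
-- def repeats_with_between(string):
--     n = len(string)
--     for c in set(string):
--         pos = {i for i in range(n) if string[i] == c}
--         if pos & {p + 2 for p in pos}:
--             return True
--     return False
-- ===== Notes on version B (the rewrite author's own statement) =====
-- stated objective: alternative
-- what changed: Instead of one index loop counting i with s[i-2]==s[i], B groups by character: for each distinct character it builds the set of its positions and tests whether that set intersects its own shift by 2.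
import Mathlib
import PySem

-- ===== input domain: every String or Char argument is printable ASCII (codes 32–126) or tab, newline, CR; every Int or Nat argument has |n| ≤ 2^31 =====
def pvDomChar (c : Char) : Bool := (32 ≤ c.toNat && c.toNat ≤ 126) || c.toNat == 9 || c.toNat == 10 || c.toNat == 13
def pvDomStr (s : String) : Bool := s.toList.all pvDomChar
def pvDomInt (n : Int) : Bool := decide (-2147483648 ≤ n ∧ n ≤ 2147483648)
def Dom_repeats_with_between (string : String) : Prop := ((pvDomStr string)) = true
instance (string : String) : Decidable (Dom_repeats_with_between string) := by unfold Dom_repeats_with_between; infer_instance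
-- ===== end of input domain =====

-- B replaces A's index loop (count matches s[i-2]==s[i], then test the counter) by a per-character
-- grouping: for each distinct character, the set of its positions is intersected with its own shift by 2.

-- ===== PORT A =====
-- counts indices i in range(2, len) with string[i-2] == string[i], then tests the counter
def repeats_with_between (string : String) : Bool :=
  let cs := string.toList
  let twices : Int := (PySem.List.pyRange 2 (cs.length : Int) 1).foldl
    (fun t index =>
      if PySem.List.pyGet? cs (index - 2) == PySem.List.pyGet? cs index then t + 1 else t) 0
  if twices > 0 then true else false

-- ===== PORT B =====
-- for c in set(string): pos = {i in range(n) | string[i] == c}; if pos & {p+2 for p in pos}: return True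
-- (the early return is an order-independent 'any' over the set's elements)
def repeats_with_between_alt (string : String) : Bool :=
  let cs := string.toList
  let n : Int := cs.length
  (PySem.Set.ofList cs).any (fun c =>
    let pos : PySem.Set Int := PySem.Set.ofList
      ((PySem.List.pyRange 0 n 1).filter (fun i => PySem.List.pyGet? cs i == some c))
    !(PySem.Set.inter pos (PySem.Set.ofList (pos.map (fun p => p + 2)))).isEmpty)

-- ===== PRECONDITION & SPEC =====
def Spec_repeats_with_between (string : String) (out : Bool) : Prop := out = repeats_with_between_alt string
instance (string : String) (out : Bool) : Decidable (Spec_repeats_with_between string out) := by unfold Spec_repeats_with_between; infer_instance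

-- ===== CLAIM (what is proved, stated in full; the proofs are below) =====
def Claim_equal_repeats_with_between : Prop := ∀ (string : String), Dom_repeats_with_between string → Spec_repeats_with_between string (repeats_with_between string)

-- ===== LEMMAS AND PROOFS =====

-- A's true-condition: some index i in [2, n) with cs[i-2] == cs[i].
theorem portA_eq_decide (cs : List Char) :
    (if ((PySem.List.pyRange 2 (cs.length : Int) 1).foldl
        (fun t index =>
          if PySem.List.pyGet? cs (index - 2) == PySem.List.pyGet? cs index then t + 1 else t)
        (0 : Int)) > 0 then true else false)
      = decide (∃ i ∈ PySem.List.pyRange 2 (cs.length : Int) 1,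
          (PySem.List.pyGet? cs (i - 2) == PySem.List.pyGet? cs i) = true) := by
  rw [PySem.List.foldl_count_if]
  have key : ((0:Int) < 0 + ((PySem.List.pyRange 2 (cs.length : Int) 1).countP
      (fun i => PySem.List.pyGet? cs (i - 2) == PySem.List.pyGet? cs i) : Int))
      ↔ ∃ i ∈ PySem.List.pyRange 2 (cs.length : Int) 1,
          (PySem.List.pyGet? cs (i - 2) == PySem.List.pyGet? cs i) = true := by
    rw [zero_add, Int.natCast_pos, List.countP_pos_iff]
  split_ifs with h
  · exact (decide_eq_true (key.mp h)).symm
  · exact (decide_eq_false (fun he => h (key.mpr he))).symm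

-- an in-range index always hits a character of the list
theorem pyGet?_mem_of_range (cs : List Char) (i : Int) (h0 : 0 ≤ i) (hn : i < cs.length) :
    ∃ c, PySem.List.pyGet? cs i = some c ∧ c ∈ cs := by
  have he : i = ((i.toNat : Nat) : Int) := by omega
  rw [he, PySem.List.pyGet?_natCast, List.getElem?_eq_getElem (by omega)]
  exact ⟨_, rfl, List.getElem_mem _⟩

-- B's true-condition coincides with A's existential.
theorem portB_iff (cs : List Char) :
    repeats_with_between_alt (String.ofList cs) = true
      ↔ (∃ i ∈ PySem.List.pyRange 2 (cs.length : Int) 1,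
          (PySem.List.pyGet? cs (i - 2) == PySem.List.pyGet? cs i) = true) := by
  unfold repeats_with_between_alt
  simp only [String.toList_ofList, List.any_eq_true, PySem.Set.mem_ofList, Bool.not_eq_true',
    List.isEmpty_eq_false_iff_exists_mem, PySem.Set.mem_inter, List.mem_filter, List.mem_map,
    PySem.List.mem_pyRange_one, beq_iff_eq]
  constructor
  · rintro ⟨c, _, x, ⟨⟨⟨hx0, hxn⟩, hxc⟩, p, ⟨⟨hp0, hpn⟩, hpc⟩, hxp⟩⟩
    refine ⟨x, ⟨by omega, hxn⟩, ?_⟩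
    have hx2 : x - 2 = p := by omega
    rw [hx2, hpc, hxc]
  · rintro ⟨i, ⟨h2, hn⟩, hp⟩
    obtain ⟨c, hic, hcm⟩ := pyGet?_mem_of_range cs i (by omega) hn
    refine ⟨c, hcm, i, ⟨⟨by omega, hn⟩, hic⟩, i - 2, ⟨⟨by omega, by omega⟩, ?_⟩, by omega⟩
    rw [hp, hic]

-- ===== VERDICT (by name: the statement is the Claim_ definition above) =====
theorem repeats_with_between_spec : Claim_equal_repeats_with_between := by
  intro s _
  unfold Spec_repeats_with_between repeats_with_between
  have hB := portB_iff s.toList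
  rw [String.ofList_toList] at hB
  rw [portA_eq_decide]
  rcases Bool.eq_false_or_eq_true (repeats_with_between_alt s) with hb | hb <;> rw [hb]
  · exact decide_eq_true (hB.mp hb)
  · exact decide_eq_false (fun he => by simp [hB.mpr he] at hb)
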